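-- pv_equiv track=rewrite | github.com/louiedweck/Tweet-Generator | histogram.py | tuplegram
-- ===== SOURCE A (Python) =====
-- def get_index(word, histogram):
--     '''Checks indices to see where word is. Helper function for histograms using lists of lists and tuples.  '''
--     current_index = 0
--     for item in histogram:
--         if item[0] == word:
--             return current_index
--         current_index += 1
--     return -1
--
-- def tuplegram(text):
--     '''Takes in strings (single) words and provides a histogram using Tuples. '''
--     tuplegram = []
--     for word in text:
--         index = get_index(word, tuplegram)
--         if index == -1:
--             tuplegram.append((word, 1))
--         else:
--             update_count = tuplegram[index][1] + 1
--             tuplegram[index] = (word, update_count)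
--     return tuplegram
-- ===== SOURCE B (Python) =====
-- def tuplegram(text):
--     '''Takes in strings (single) words and provides a histogram using Tuples. '''
--     words = list(text)
--     seen = []
--     for w in words:
--         if w not in seen:
--             seen.append(w)
--     return [(w, words.count(w)) for w in seen]
-- ===== Notes on version B (the rewrite author's own statement) =====
-- stated objective: alternative
-- what changed: B splits the task into staged passes: it first materializes the input and builds the ordered list of distinct words, then produces the result by counting each distinct word with a separate scan (words.count), instead of A's single interleaved scan that searches a growing tuple list and updates counts in place.
import Mathlib
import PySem

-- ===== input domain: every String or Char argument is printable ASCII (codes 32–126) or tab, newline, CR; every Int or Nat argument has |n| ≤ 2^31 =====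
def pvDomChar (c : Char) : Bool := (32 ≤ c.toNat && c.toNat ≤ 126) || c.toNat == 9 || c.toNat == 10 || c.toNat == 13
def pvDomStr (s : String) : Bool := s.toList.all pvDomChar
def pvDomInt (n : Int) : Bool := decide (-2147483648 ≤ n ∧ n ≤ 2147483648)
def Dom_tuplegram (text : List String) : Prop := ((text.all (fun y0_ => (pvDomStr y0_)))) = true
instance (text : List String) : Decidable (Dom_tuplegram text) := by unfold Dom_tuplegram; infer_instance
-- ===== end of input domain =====

-- B is a staged re-decomposition (same cost): one pass collecting the distinct words in
-- first-seen order, then a comprehension counting each distinct word by scanning the input,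
-- instead of A's single interleaved scan-and-update over a growing tuple list.

-- ===== PORT A =====
-- get_index: linear scan with a running index, -1 if absent
def getIndexAux (word : String) (histogram : List (String × Int)) (i : Int) : Int :=
  match histogram with
  | [] => -1
  | item :: rest => if item.1 = word then i else getIndexAux word rest (i + 1)

def get_index (word : String) (histogram : List (String × Int)) : Int :=
  getIndexAux word histogram 0

def tuplegramStep (hist : List (String × Int)) (word : String) : List (String × Int) :=
  let index := get_index word hist
  if index = -1 then hist ++ [(word, 1)]
  else
    let update_count := (PySem.List.pyGetD hist index (word, 0)).2 + 1
    PySem.List.pySetD hist index (word, update_count)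

def tuplegram (text : List String) : List (String × Int) :=
  text.foldl tuplegramStep []

-- ===== PORT B =====
-- pass 1: ordered distinct words (append if not already present)
def tuplegram_alt (text : List String) : List (String × Int) :=
  let words := text
  let seen := words.foldl (fun s w => if w ∈ s then s else s ++ [w]) []
  seen.map (fun w => (w, (words.count w : Int)))

-- ===== PRECONDITION & SPEC =====
def Spec_tuplegram (text : List String) (out : List (String × Int)) : Prop := out = tuplegram_alt text
instance (text : List String) (out : List (String × Int)) : Decidable (Spec_tuplegram text out) := by unfold Spec_tuplegram; infer_instance

-- ===== CLAIM (what is proved, stated in full; the proofs are below) =====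
def Claim_equal_tuplegram : Prop := ∀ (text : List String), Dom_tuplegram text → Spec_tuplegram text (tuplegram text)

-- ===== LEMMAS AND PROOFS =====

theorem getIndexAux_map (w : String) (seen : List String) (c : String → Int) (i : Int) :
    getIndexAux w (seen.map (fun x => (x, c x))) i
      = if w ∈ seen then i + (seen.idxOf w : Int) else -1 := by
  induction seen generalizing i with
  | nil => simp [getIndexAux]
  | cons a rest ih =>
    by_cases h : a = w
    · subst h; simp [getIndexAux, List.idxOf_cons_self]
    · have hne : w ≠ a := fun he => h he.symm
      simp only [List.map_cons, getIndexAux, h, if_false]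
      rw [ih]
      by_cases hw : w ∈ rest
      · simp only [hw, if_true, List.mem_cons, hne, false_or,
          List.idxOf_cons_ne _ h]
        push_cast
        ring
      · simp [hw, List.mem_cons, hne]

theorem set_map_idxOf (seen : List String) (c : String → Int) (w : String) (v : Int)
    (hnd : seen.Nodup) (hw : w ∈ seen) :
    (seen.map (fun x => (x, c x))).set (seen.idxOf w) (w, v)
      = seen.map (fun x => (x, if x = w then v else c x)) := by
  induction seen with
  | nil => cases hw
  | cons a rest ih =>
    by_cases h : a = w
    · subst h
      simp only [List.idxOf_cons_self, List.map_cons, List.set_cons_zero]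
      have hnr : a ∉ rest := (List.nodup_cons.mp hnd).1
      congr 1
      apply List.map_congr_left
      intro x hx
      have : x ≠ a := fun he => hnr (he ▸ hx)
      simp [this]
    · have hw' : w ∈ rest := by
        rcases List.mem_cons.mp hw with h1 | h1
        · exact absurd h1.symm h
        · exact h1
      simp only [List.idxOf_cons_ne _ h, List.map_cons, List.set_cons_succ]
      rw [ih (List.nodup_cons.mp hnd).2 hw']
      simp [h]

theorem getD_map_idxOf (seen : List String) (c : String → Int) (w : String) (d : String × Int)
    (hw : w ∈ seen) :
    PySem.List.pyGetD (seen.map (fun x => (x, c x))) (seen.idxOf w : Int) d = (w, c w) := by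
  have hlt : seen.idxOf w < seen.length := List.idxOf_lt_length_of_mem hw
  rw [PySem.List.pyGetD_natCast]
  rw [List.getD_eq_getElem _ _ (by simpa using hlt)]
  simp

-- (w :: rest).count x as an Int, split on whether x = w
theorem count_cons_int (x w : String) (rest : List String) :
    ((w :: rest).count x : Int)
      = (if x = w then 1 else 0) + (rest.count x : Int) := by
  simp only [List.count_cons]
  by_cases h : x = w
  · subst h; simp; ring
  · simp [h]
    exact fun he => h he.symm

theorem tuplegram_invariant (text : List String) :
    ∀ (seen : List String) (c : String → Int), seen.Nodup →
    List.foldl tuplegramStep (seen.map (fun x => (x, c x))) text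
      = (List.foldl (fun s w => if w ∈ s then s else s ++ [w]) seen text).map
          (fun x => (x, (if x ∈ seen then c x else 0) + (text.count x : Int))) := by
  induction text with
  | nil =>
    intro seen c _
    simp only [List.foldl_nil, List.count_nil]
    apply List.map_congr_left
    intro x hx
    simp [hx]
  | cons w rest ih =>
    intro seen c hnd
    by_cases hw : w ∈ seen
    · have hidx : get_index w (seen.map (fun x => (x, c x))) = (seen.idxOf w : Int) := by
        simp [get_index, getIndexAux_map, hw]
      have hne : ((seen.idxOf w : Int)) ≠ -1 := by
        have := Int.natCast_nonneg (seen.idxOf w); omega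
      have hstep : tuplegramStep (seen.map (fun x => (x, c x))) w
          = seen.map (fun x => (x, if x = w then c w + 1 else c x)) := by
        rw [tuplegramStep]
        simp only [hidx, if_neg hne, getD_map_idxOf seen c w _ hw]
        rw [PySem.List.pySetD_natCast]
        exact set_map_idxOf seen c w (c w + 1) hnd hw
      rw [List.foldl_cons, hstep, ih seen _ hnd]
      simp only [List.foldl_cons, if_pos hw]
      congr 1
      funext x
      rw [count_cons_int]
      by_cases hxw : x = w
      · subst hxw; simp [hw]; ring
      · simp [hxw]
    · have hidx : get_index w (seen.map (fun x => (x, c x))) = -1 := by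
        simp [get_index, getIndexAux_map, hw]
      have hstep : tuplegramStep (seen.map (fun x => (x, c x))) w
          = (seen ++ [w]).map (fun x => (x, if x = w then 1 else c x)) := by
        rw [tuplegramStep]
        simp only [hidx, List.map_append, List.map_cons, List.map_nil, if_true]
        congr 1
        apply List.map_congr_left
        intro x hx
        have : x ≠ w := fun he => hw (he ▸ hx)
        simp [this]
      have hnd' : (seen ++ [w]).Nodup := by
        rw [List.nodup_append]
        refine ⟨hnd, List.nodup_singleton w, ?_⟩
        intro a ha b hb
        have hbw : b = w := by simpa using hb
        subst hbw
        exact fun he => hw (he ▸ ha)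
      rw [List.foldl_cons, hstep, ih (seen ++ [w]) _ hnd']
      simp only [List.foldl_cons, if_neg hw]
      congr 1
      funext x
      rw [count_cons_int]
      by_cases hxw : x = w
      · subst hxw; simp [hw]
      · simp only [List.mem_append, List.mem_singleton, hxw, or_false]
        by_cases hx : x ∈ seen <;> simp [hx]

-- ===== VERDICT (by name: the statement is the Claim_ definition above) =====
theorem tuplegram_spec : Claim_equal_tuplegram := by
  intro text _
  unfold Spec_tuplegram tuplegram tuplegram_alt
  have h := tuplegram_invariant text [] (fun _ => 0) List.nodup_nil
  simp only [List.map_nil] at h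
  rw [h]
  apply List.map_congr_left
  intro x _
  simp
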